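-- pv_equiv track=rewrite | github.com/nbrahman/HackerRank | 01 Algorithms/10 Bit Manipulation/Counter-Game.py | solutionCounterGame
-- ===== SOURCE A (Python) =====
-- def solutionCounterGame(n):
--     count = 0
--     n -= 1
--     while (n > 0):
--         n &= (n - 1)
--         count += 1
--     if count & 1:
--         return 'Louise'
--     else:
--         return 'Richard'
-- ===== SOURCE B (Python) =====
-- def solutionCounterGame(n):
--     n -= 1
--     parity = False
--     while n > 0:
--         if n & 1:
--             parity = not parity
--         n >>= 1
--     return 'Louise' if parity else 'Richard'
-- ===== Notes on version B (the rewrite author's own statement) =====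
-- stated objective: alternative
-- what changed: B replaces Kernighan's clear-lowest-set-bit counting loop with a right-shift scan over all bit positions that XOR-toggles a parity flag, never keeping a count.
import Mathlib
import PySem

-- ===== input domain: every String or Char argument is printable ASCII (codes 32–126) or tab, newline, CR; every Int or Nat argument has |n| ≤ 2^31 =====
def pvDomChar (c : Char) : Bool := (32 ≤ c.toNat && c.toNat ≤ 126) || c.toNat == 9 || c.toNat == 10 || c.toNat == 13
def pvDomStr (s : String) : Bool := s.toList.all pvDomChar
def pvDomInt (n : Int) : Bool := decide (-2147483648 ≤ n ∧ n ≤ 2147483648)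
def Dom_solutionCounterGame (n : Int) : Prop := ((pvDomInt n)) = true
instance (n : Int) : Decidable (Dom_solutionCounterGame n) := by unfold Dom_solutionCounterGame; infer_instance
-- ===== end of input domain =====

-- B replaces A's Kernighan clear-lowest-set-bit counting loop with a right-shift scan
-- over bit positions that toggles a parity flag (objective: alternative algorithm).

-- ===== PORT A =====
-- termination helper for A's loop: n &= n-1 shrinks a positive n
theorem pvLandDescent (n : Int) (h : 0 < n) :
    Int.land n (n - 1) = ((n.toNat &&& (n.toNat - 1) : Nat) : Int) := by
  obtain ⟨m, rfl⟩ : ∃ m : Nat, n = (m : Int) := ⟨n.toNat, (Int.toNat_of_nonneg h.le).symm⟩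
  have hm : 0 < m := by omega
  have h1 : ((m : Int)) - 1 = ((m - 1 : Nat) : Int) := by omega
  rw [h1]
  rfl

theorem pvLandDescent_lt (n : Int) (h : 0 < n) :
    (Int.land n (n - 1)).toNat < n.toNat := by
  rw [pvLandDescent n h]
  have h1 : n.toNat &&& (n.toNat - 1) ≤ n.toNat - 1 := Nat.and_le_right
  have h2 : 0 < n.toNat := by omega
  simp only [Int.toNat_natCast]
  omega

-- while (n > 0): n &= (n - 1); count += 1
def pvKernLoop (n : Int) (count : Nat) : Nat :=
  if h : 0 < n then pvKernLoop (Int.land n (n - 1)) (count + 1) else count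
termination_by n.toNat
decreasing_by exact pvLandDescent_lt n h

def solutionCounterGame (n : Int) : String :=
  let count := pvKernLoop (n - 1) 0
  if count &&& 1 = 1 then "Louise" else "Richard"

-- ===== PORT B =====
theorem pvShiftDescent_lt (n : Int) (h : 0 < n) : (n >>> (1 : Int)).toNat < n.toNat := by
  obtain ⟨m, rfl⟩ : ∃ m : Nat, n = (m : Int) := ⟨n.toNat, (Int.toNat_of_nonneg h.le).symm⟩
  have : ((m : Int)) >>> (1 : Int) = ((m >>> 1 : Nat) : Int) := rfl
  rw [this]
  simp only [Int.toNat_natCast, Nat.shiftRight_succ, Nat.shiftRight_zero]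
  omega

-- while n > 0: if n & 1: parity = not parity; n >>= 1
def pvScanLoop (n : Int) (parity : Bool) : Bool :=
  if h : 0 < n then
    pvScanLoop (n >>> (1 : Int)) (if Int.land n 1 ≠ 0 then !parity else parity)
  else parity
termination_by n.toNat
decreasing_by exact pvShiftDescent_lt n h

def solutionCounterGame_alt (n : Int) : String :=
  if pvScanLoop (n - 1) false then "Louise" else "Richard"

-- ===== PRECONDITION & SPEC =====
def Spec_solutionCounterGame (n : Int) (out : String) : Prop := out = solutionCounterGame_alt n
instance (n : Int) (out : String) : Decidable (Spec_solutionCounterGame n out) := by unfold Spec_solutionCounterGame; infer_instance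

-- ===== CLAIM (what is proved, stated in full; the proofs are below) =====
def Claim_equal_solutionCounterGame : Prop := ∀ (n : Int), Dom_solutionCounterGame n → Spec_solutionCounterGame n (solutionCounterGame n)

-- ===== LEMMAS AND PROOFS =====

-- Nat models of the two loops
def pvKernN (m : Nat) : Nat :=
  if h : 0 < m then pvKernN (m &&& (m - 1)) + 1 else 0
termination_by m
decreasing_by
  have h1 : m &&& (m - 1) ≤ m - 1 := Nat.and_le_right
  omega

def pvBitN (m : Nat) : Nat :=
  if 0 < m then m % 2 + pvBitN (m / 2) else 0
termination_by m
decreasing_by omega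

theorem pvBitN_even (k : Nat) : pvBitN (2 * k) = pvBitN k := by
  rcases Nat.eq_zero_or_pos k with hk | hk
  · simp [hk]
  · rw [pvBitN]
    have : 0 < 2 * k := by omega
    simp [this, Nat.mul_div_cancel_left k (by norm_num : 0 < 2), Nat.mul_mod_right]

theorem pvBitN_odd (k : Nat) : pvBitN (2 * k + 1) = 1 + pvBitN k := by
  rw [pvBitN]
  have h1 : (2 * k + 1) % 2 = 1 := by omega
  have h2 : (2 * k + 1) / 2 = k := by omega
  simp [h1, h2]

theorem pvLand_even (k : Nat) (hk : 0 < k) : (2 * k) &&& (2 * k - 1) = 2 * (k &&& (k - 1)) := by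
  have h1 : (2 * k : Nat) = Nat.bit false k := by simp [Nat.bit]
  have h2 : (2 * k - 1 : Nat) = Nat.bit true (k - 1) := by simp [Nat.bit]; omega
  rw [h2, h1, Nat.land_bit]; simp [Nat.bit]

theorem pvLand_odd (k : Nat) : (2 * k + 1) &&& (2 * k) = 2 * k := by
  have hs : k &&& k = k := Nat.eq_of_testBit_eq (by simp)
  have h1 : (2 * k + 1 : Nat) = Nat.bit true k := by simp [Nat.bit]
  have h2 : (2 * k : Nat) = Nat.bit false k := by simp [Nat.bit]
  rw [h1]; conv_lhs => rw [h2]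
  rw [Nat.land_bit]; simp [Nat.bit, hs]

theorem pvKernN_eq_bitN : ∀ m, pvKernN m = pvBitN m := by
  intro m
  induction m using Nat.strong_induction_on with
  | _ m ih =>
    rcases Nat.eq_zero_or_pos m with hm | hm
    · subst hm; rw [pvKernN, pvBitN]; simp
    · rcases Nat.even_or_odd m with ⟨k, hk⟩ | ⟨k, hk⟩
      · -- m = 2k, k > 0
        have hk' : 0 < k := by omega
        have hland : m &&& (m - 1) = 2 * (k &&& (k - 1)) := by
          rw [hk, show k + k = 2 * k by ring, pvLand_even k hk']
        have hj : k &&& (k - 1) ≤ k - 1 := Nat.and_le_right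
        rw [pvKernN]; simp only [hm, dif_pos, hland]
        have e1 : pvKernN (2 * (k &&& (k - 1))) = pvBitN (2 * (k &&& (k - 1))) :=
          ih _ (by omega)
        rw [e1, pvBitN_even]
        have e2 : pvBitN m = pvBitN k := by rw [hk, show k + k = 2 * k by ring, pvBitN_even]
        rw [e2]
        have e3 : pvBitN k = pvKernN k := (ih k (by omega)).symm
        rw [e3, pvKernN]; simp only [hk', dif_pos]
        rw [ih (k &&& (k - 1)) (by omega)]
      · -- m = 2k + 1
        have hland : m &&& (m - 1) = 2 * k := by
          rw [hk, show 2 * k + 1 - 1 = 2 * k by omega, pvLand_odd]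
        rw [pvKernN]; simp only [hm, dif_pos, hland]
        rw [ih (2 * k) (by omega), pvBitN_even, hk, pvBitN_odd]
        omega

theorem pvKernLoop_eq (m : Nat) : ∀ c, pvKernLoop ((m : Int)) c = c + pvKernN m := by
  induction m using Nat.strong_induction_on with
  | _ m ih =>
    intro c
    rcases Nat.eq_zero_or_pos m with hm | hm
    · subst hm; rw [pvKernLoop, pvKernN]; simp
    · have hpos : (0 : Int) < (m : Int) := by omega
      rw [pvKernLoop]; simp only [hpos, dif_pos]
      rw [pvLandDescent _ hpos]
      have ht : ((m : Int)).toNat = m := rfl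
      rw [ht]
      have hlt : m &&& (m - 1) < m := by
        have := Nat.and_le_right (n := m) (m := m - 1); omega
      rw [ih _ hlt]
      conv_rhs => rw [pvKernN]
      rw [dif_pos hm]
      omega

theorem pvScanLoop_eq (m : Nat) : ∀ p, pvScanLoop ((m : Int)) p = xor p (decide (pvBitN m % 2 = 1)) := by
  induction m using Nat.strong_induction_on with
  | _ m ih =>
    intro p
    rcases Nat.eq_zero_or_pos m with hm | hm
    · subst hm; rw [pvScanLoop, pvBitN]; simp
    · have hpos : (0 : Int) < (m : Int) := by omega
      rw [pvScanLoop]; simp only [hpos, dif_pos]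
      have hshift : ((m : Int)) >>> (1 : Int) = ((m / 2 : Nat) : Int) := by
        have : ((m : Int)) >>> (1 : Int) = ((m >>> 1 : Nat) : Int) := rfl
        rw [this]; simp [Nat.shiftRight_succ, Nat.shiftRight_zero]
      have hland : Int.land ((m : Int)) 1 = ((m % 2 : Nat) : Int) := by
        have : Int.land ((m : Int)) ((1 : Int)) = ((m &&& 1 : Nat) : Int) := rfl
        simpa [Nat.and_one_is_mod] using this
      rw [hshift, hland, ih (m / 2) (by omega)]
      conv_rhs => rw [pvBitN]
      rw [if_pos hm]
      rcases Nat.mod_two_eq_zero_or_one m with h2 | h2 <;>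
        rcases Nat.mod_two_eq_zero_or_one (pvBitN (m / 2)) with h3 | h3 <;>
          simp [h2, Nat.add_mod, h3]

-- ===== VERDICT (by name: the statement is the Claim_ definition above) =====
theorem solutionCounterGame_spec : Claim_equal_solutionCounterGame := by
  intro n _
  unfold Spec_solutionCounterGame solutionCounterGame solutionCounterGame_alt
  rcases (by omega : n - 1 ≤ 0 ∨ 0 < n - 1) with h | h
  · have h1 : ¬ (0 : Int) < n - 1 := by omega
    rw [pvKernLoop, pvScanLoop, dif_neg h1, dif_neg h1]
    norm_num
  · obtain ⟨m, hm⟩ : ∃ m : Nat, n - 1 = (m : Int) :=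
      ⟨(n - 1).toNat, (Int.toNat_of_nonneg h.le).symm⟩
    rw [hm, pvKernLoop_eq, pvScanLoop_eq, pvKernN_eq_bitN]
    simp only [Nat.zero_add, Nat.and_one_is_mod, Bool.false_xor]
    rcases Nat.mod_two_eq_zero_or_one (pvBitN m) with h2 | h2 <;> simp [h2]
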